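-- pv_equiv track=rewrite | github.com/gotfishmakesticks/SPbVKIDGamma | dz4.py | dignums
-- ===== SOURCE A (Python) =====
-- def dignums(a):
--     b = 0
--     temp = []
--     while a > 0:
--         temp.append(a%10)
--         a //= 10
--         b += 1
--     return "В числе " + str(b) + " цифр\nЦифры числа: " + str(list(reversed(temp)))
-- ===== SOURCE B (Python) =====
-- def dignums(a):
--     s = str(a)
--     digits = [ord(c) - 48 for c in s] if a > 0 else []
--     return "В числе " + str(len(digits)) + " цифр\nЦифры числа: " + str(digits)
-- ===== Notes on version B (the rewrite author's own statement) =====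
-- stated objective: idiomatic
-- what changed: B obtains the digits from the decimal string str(a) (one conversion, no reversal) instead of A's modular-arithmetic loop that builds the digits low-to-high and reverses them.
import Mathlib
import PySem

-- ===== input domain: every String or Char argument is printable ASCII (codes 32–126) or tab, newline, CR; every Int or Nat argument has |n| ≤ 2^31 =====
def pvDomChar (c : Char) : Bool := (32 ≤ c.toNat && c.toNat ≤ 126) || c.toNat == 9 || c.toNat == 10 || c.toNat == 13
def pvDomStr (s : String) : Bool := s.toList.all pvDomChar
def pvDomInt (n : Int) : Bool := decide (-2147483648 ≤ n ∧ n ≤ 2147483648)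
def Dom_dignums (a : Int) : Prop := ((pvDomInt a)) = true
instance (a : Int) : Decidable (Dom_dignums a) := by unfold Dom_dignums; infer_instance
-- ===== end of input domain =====

-- B reads the digits off the decimal string str(a) instead of A's modular loop; objective: idiomatic.

-- str(list_of_ints): "[" ++ ", ".join(str(d) for d) ++ "]" — shared str(list) rendering both Pythons call
def pyReprIntList (xs : List Int) : String :=
  "[" ++ PySem.Str.join ", " (xs.map PySem.Int.toStr) ++ "]"

-- ===== PORT A =====
-- while a > 0: temp.append(a%10); a //= 10; b += 1
def dignumsLoop (a : Int) (b : Int) (temp : List Int) : Int × List Int :=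
  if _h : a > 0 then
    dignumsLoop (PySem.Int.floordiv a 10) (b + 1) (temp ++ [PySem.Int.mod a 10])
  else (b, temp)
termination_by a.toNat
decreasing_by
  have h10 : PySem.Int.floordiv a 10 = a / 10 :=
    PySem.Int.floordiv_eq_ediv_of_pos (by norm_num)
  rw [h10]; omega

def dignums (a : Int) : String :=
  let r := dignumsLoop a 0 []
  "В числе " ++ PySem.Int.toStr r.1 ++ " цифр\nЦифры числа: " ++ pyReprIntList r.2.reverse

-- ===== PORT B =====
-- s = str(a); digits = [ord(c)-48 for c in s] if a > 0 else []
def dignums_alt (a : Int) : String :=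
  let s := PySem.Int.toStr a
  let digits : List Int := if a > 0 then s.toList.map (fun c => (c.toNat : Int) - 48) else []
  "В числе " ++ PySem.Int.toStr (PySem.List.len digits) ++ " цифр\nЦифры числа: " ++ pyReprIntList digits

-- ===== PRECONDITION & SPEC =====
def Spec_dignums (a : Int) (out : String) : Prop := out = dignums_alt a
instance (a : Int) (out : String) : Decidable (Spec_dignums a out) := by unfold Spec_dignums; infer_instance

-- ===== CLAIM (what is proved, stated in full; the proofs are below) =====
def Claim_equal_dignums : Prop := ∀ (a : Int), Dom_dignums a → Spec_dignums a (dignums a)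

-- ===== LEMMAS AND PROOFS =====

-- little-endian digits of a natural number, as A's loop produces them
def lowDigits (n : Nat) : List Int :=
  if n = 0 then [] else ((n % 10 : Nat) : Int) :: lowDigits (n / 10)
decreasing_by omega

def lowChars (n : Nat) : List Char :=
  if n = 0 then [] else Nat.digitChar (n % 10) :: lowChars (n / 10)
decreasing_by omega

lemma lowDigits_eq (n : Nat) (hn : n ≠ 0) :
    lowDigits n = ((n % 10 : Nat) : Int) :: lowDigits (n / 10) := by
  rw [lowDigits, if_neg hn]

lemma lowChars_eq (n : Nat) (hn : n ≠ 0) :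
    lowChars n = Nat.digitChar (n % 10) :: lowChars (n / 10) := by
  rw [lowChars, if_neg hn]

lemma dignumsLoop_eq (n : Nat) : ∀ (b : Int) (temp : List Int),
    dignumsLoop (n : Int) b temp = (b + (lowDigits n).length, temp ++ lowDigits n) := by
  induction n using Nat.strong_induction_on with
  | _ n ih =>
    intro b temp
    rw [dignumsLoop]
    by_cases h : (n : Int) > 0
    · have hn : n ≠ 0 := by omega
      have hf : PySem.Int.floordiv (n : Int) 10 = ((n / 10 : Nat) : Int) := by
        exact_mod_cast PySem.Int.floordiv_natCast n 10
      have hm : PySem.Int.mod (n : Int) 10 = ((n % 10 : Nat) : Int) := by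
        exact_mod_cast PySem.Int.mod_natCast n 10
      rw [dif_pos h, hf, hm, ih (n / 10) (by omega)]
      rw [lowDigits_eq n hn]
      simp only [List.length_cons, List.append_assoc, List.singleton_append, Prod.mk.injEq]
      refine ⟨by push_cast; ring, trivial⟩
    · have hn : n = 0 := by omega
      subst hn
      rw [dif_neg h, lowDigits]
      simp

lemma toDigitsCore_eq (f : Nat) : ∀ (n : Nat) (l : List Char), 0 < n → n < 10 ^ f →
    Nat.toDigitsCore 10 f n l = (lowChars n).reverse ++ l := by
  induction f with
  | zero => intro n l h1 h2; omega
  | succ f ih =>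
    intro n l h1 h2
    rw [Nat.toDigitsCore]
    by_cases hd : n / 10 = 0
    · rw [if_pos hd, lowChars_eq n (by omega), hd, lowChars]
      simp
    · rw [if_neg hd, ih (n / 10) _ (by omega) (by
        have : n / 10 < 10 ^ f := by
          rw [Nat.pow_succ] at h2
          exact Nat.div_lt_of_lt_mul (by omega)
        exact this)]
      rw [lowChars_eq n (by omega)]
      simp

lemma toDigits_eq (n : Nat) (h : 0 < n) :
    Nat.toDigits 10 n = (lowChars n).reverse := by
  have hlt : n < 10 ^ (n + 1) := by
    calc n < 2 ^ n := Nat.lt_two_pow_self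
    _ ≤ 10 ^ n := Nat.pow_le_pow_left (by norm_num) n
    _ ≤ 10 ^ (n + 1) := Nat.pow_le_pow_right (by norm_num) (by omega)
  rw [Nat.toDigits, toDigitsCore_eq (n + 1) n [] h hlt, List.append_nil]

lemma digitChar_toNat (d : Nat) (h : d < 10) : ((Nat.digitChar d).toNat : Int) - 48 = (d : Int) := by
  interval_cases d <;> decide

lemma map_lowChars (n : Nat) :
    (lowChars n).map (fun c => (c.toNat : Int) - 48) = lowDigits n := by
  induction n using Nat.strong_induction_on with
  | _ n ih =>
    by_cases hn : n = 0
    · subst hn; rw [lowChars, lowDigits]; simp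
    · rw [lowChars_eq n hn, lowDigits_eq n hn]
      simp only [List.map_cons, ih (n / 10) (by omega)]
      rw [digitChar_toNat (n % 10) (by omega)]

-- ===== VERDICT (by name: the statement is the Claim_ definition above) =====
theorem dignums_spec : Claim_equal_dignums := by
  intro a _
  unfold Spec_dignums dignums dignums_alt
  by_cases h : a > 0
  · have hn : a = ((a.toNat : Nat) : Int) := by omega
    have hpos : 0 < a.toNat := by omega
    rw [hn]
    rw [dignumsLoop_eq a.toNat 0 []]
    simp only [List.nil_append, if_pos (show ((a.toNat : Nat) : Int) > 0 by omega)]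
    have hchars : (PySem.Int.toStr ((a.toNat : Nat) : Int)).toList = (lowChars a.toNat).reverse := by
      rw [PySem.Int.toList_toStr]
      unfold PySem.Int.toChars
      rw [if_neg (by omega), Int.toNat_natCast, toDigits_eq a.toNat hpos]
    rw [hchars]
    have hmap : ((lowChars a.toNat).reverse).map (fun c => (c.toNat : Int) - 48)
        = (lowDigits a.toNat).reverse := by
      rw [List.map_reverse, map_lowChars]
    rw [hmap]
    have hlen : PySem.List.len (lowDigits a.toNat).reverse = 0 + ((lowDigits a.toNat).length : Int) := by
      simp [PySem.List.len_eq]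
    rw [hlen]
  · have ha : ¬ ((a : Int) > 0) := h
    rw [dignumsLoop, dif_neg ha]
    simp [ha, PySem.List.len]
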